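-- pv_equiv track=rewrite | github.com/Lynchie/KCM | process.py | pair_up
-- ===== SOURCE A (Python) =====
-- def pair_up( staves ):
--
--     pairstaves = [staves[0]]
--
--     for i in range(len(staves)-1):
--         if staves[i]+1 != staves[i+1]:
--             pairstaves.extend((staves[i], staves[i+1]))
--
--     pairstaves.append(staves[-1])
--
--     pairstaves = [ [pairstaves[i],pairstaves[i+1]] for i in range(0,len(pairstaves),2) ]
--
--     return pairstaves
-- ===== SOURCE B (Python) =====
-- def pair_up(staves):
--     start = staves[0]
--     prev = staves[0]
--     result = []
--     for x in staves[1:]: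
--         if x != prev + 1:
--             result.append([start, prev])
--             start = x
--         prev = x
--     result.append([start, prev])
--     return result
-- ===== Notes on version B (the rewrite author's own statement) =====
-- stated objective: simpler
-- what changed: B does one pass maintaining a running range start and the previous element, emitting a finished [start, prev] pair at each break, instead of A's flat boundary list reshaped afterwards by a step-2 index comprehension.
-- outside the precondition, e.g. on pair_up([]): A raises IndexError, B raises IndexError
import Mathlib
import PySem

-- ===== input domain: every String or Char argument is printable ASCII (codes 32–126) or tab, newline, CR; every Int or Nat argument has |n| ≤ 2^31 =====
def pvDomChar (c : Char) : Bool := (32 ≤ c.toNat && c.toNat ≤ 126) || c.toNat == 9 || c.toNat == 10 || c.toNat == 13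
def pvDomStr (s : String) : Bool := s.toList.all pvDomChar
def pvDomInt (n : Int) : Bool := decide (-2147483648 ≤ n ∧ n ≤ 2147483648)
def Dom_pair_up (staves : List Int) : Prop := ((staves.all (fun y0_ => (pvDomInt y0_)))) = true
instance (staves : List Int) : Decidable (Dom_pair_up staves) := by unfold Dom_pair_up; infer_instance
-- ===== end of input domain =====

-- B replaces A's flat boundary list + step-2 reshaping comprehension by one pass with a
-- running range start; same O(n) cost, simpler decomposition. Both raise IndexError on [].

-- ===== PORT A =====
-- Literal port of A. staves[0] and staves[-1] are pyGet? (none = IndexError, excluded by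
-- Pre_); the loop indices i, i+1 and the comprehension indices are always in range in
-- Python (the boundary list always has even length), so pyGetD with default 0 is exact there.
def pair_up (staves : List Int) : List (List Int) :=
  match PySem.List.pyGet? staves 0, PySem.List.pyGet? staves (-1) with
  | some h, some l =>
    let ps := (PySem.List.pyRange 0 ((staves.length : Int) - 1) 1).foldl
      (fun acc i =>
        if PySem.List.pyGetD staves i 0 + 1 ≠ PySem.List.pyGetD staves (i + 1) 0 then
          acc ++ [PySem.List.pyGetD staves i 0, PySem.List.pyGetD staves (i + 1) 0]
        else acc) [h]
    let ps2 := ps ++ [l]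
    (PySem.List.pyRange 0 (ps2.length : Int) 2).map
      (fun i => [PySem.List.pyGetD ps2 i 0, PySem.List.pyGetD ps2 (i + 1) 0])
  | _, _ => []

-- ===== PORT B =====
-- Port of B: fold over the tail with state (result, start, prev).
def pair_up_alt (staves : List Int) : List (List Int) :=
  match staves with
  | [] => []   -- Python B raises IndexError here (staves[0]); excluded by Pre_
  | h :: t =>
    let s := t.foldl
      (fun (st : List (List Int) × Int × Int) x =>
        if x ≠ st.2.2 + 1 then (st.1 ++ [[st.2.1, st.2.2]], x, x)
        else (st.1, st.2.1, x)) ([], h, h)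
    s.1 ++ [[s.2.1, s.2.2]]

-- ===== PRECONDITION & SPEC =====
-- Pre_ excludes only the empty list, on which both A and B raise IndexError (staves[0]).
def Pre_pair_up (staves : List Int) : Prop := staves ≠ []
instance (staves : List Int) : Decidable (Pre_pair_up staves) := by unfold Pre_pair_up; infer_instance
def pvWitness_pair_up : List Int := [1, 2, 5]

def Spec_pair_up (staves : List Int) (out : List (List Int)) : Prop := out = pair_up_alt staves
instance (staves : List Int) (out : List (List Int)) : Decidable (Spec_pair_up staves out) := by unfold Spec_pair_up; infer_instance

-- ===== CLAIM (what is proved, stated in full; the proofs are below) =====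
def Claim_equal_pair_up : Prop := ∀ (staves : List Int), Dom_pair_up staves → Pre_pair_up staves → Spec_pair_up staves (pair_up staves)

-- ===== LEMMAS AND PROOFS =====

-- reference form of B's output: segments of the remaining input, given current start/prev
def segs : Int → Int → List Int → List (List Int)
  | start, prev, [] => [[start, prev]]
  | start, prev, x :: xs => if x ≠ prev + 1 then [start, prev] :: segs x x xs else segs start x xs

-- A's flat boundary list contributed by the loop, given previous element
def bnd : Int → List Int → List Int
  | _, [] => []
  | prev, x :: xs => (if prev + 1 ≠ x then [prev, x] else []) ++ bnd x xs

-- last element of h :: t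
def lastD : Int → List Int → Int
  | p, [] => p
  | _, x :: xs => lastD x xs

-- pairing a flat even-length list two at a time
def pairs : List Int → List (List Int)
  | a :: b :: r => [a, b] :: pairs r
  | _ => []

def bstep (st : List (List Int) × Int × Int) (x : Int) : List (List Int) × Int × Int :=
  if x ≠ st.2.2 + 1 then (st.1 ++ [[st.2.1, st.2.2]], x, x) else (st.1, st.2.1, x)

theorem foldl_alt (t : List Int) (res : List (List Int)) (start prev : Int) :
    (t.foldl bstep (res, start, prev)).1
      ++ [[(t.foldl bstep (res, start, prev)).2.1, (t.foldl bstep (res, start, prev)).2.2]]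
      = res ++ segs start prev t := by
  induction t generalizing res start prev with
  | nil => simp [segs]
  | cons x xs ih =>
    rw [List.foldl_cons]
    by_cases hx : x = prev + 1
    · have hs : bstep (res, start, prev) x = (res, start, x) := by simp [bstep, hx]
      rw [hs, show segs start prev (x :: xs) = segs start x xs from by simp [segs, hx]]
      exact ih res start x
    · have hs : bstep (res, start, prev) x = (res ++ [[start, prev]], x, x) := by
        simp [bstep, hx]
      rw [hs, show segs start prev (x :: xs) = [start, prev] :: segs x x xs from by
        simp [segs, hx]]
      rw [ih (res ++ [[start, prev]]) x x]
      simp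

theorem bnd_even (prev : Int) (t : List Int) : Even (bnd prev t).length := by
  induction t generalizing prev with
  | nil => simp [bnd]
  | cons x xs ih =>
    simp only [bnd, List.length_append]
    by_cases h : prev + 1 = x
    · simpa [h] using ih x
    · rcases ih x with ⟨m, hm⟩
      refine ⟨m + 1, ?_⟩
      simp [h, hm]
      omega

theorem getElem_lastD : ∀ (h : Int) (t : List Int), (h :: t)[t.length]? = some (lastD h t) := by
  intro h t
  induction t generalizing h with
  | nil => rfl
  | cons x xs ih => simpa [lastD] using ih x

theorem lastD_pyGet (h : Int) (t : List Int) :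
    PySem.List.pyGet? (h :: t) (-1) = some (lastD h t) := by
  have hidx : PySem.List.pyIdx? (t.length + 1) (-1) = some t.length := by
    simp [PySem.List.pyIdx?]
  simp only [PySem.List.pyGet?, List.length_cons, hidx, Option.bind_some]
  exact getElem_lastD h t

theorem bndIdx (h : Int) (t : List Int) (acc : List Int) :
    (List.range t.length).foldl
      (fun acc k => if (h :: t).getD k 0 + 1 ≠ (h :: t).getD (k + 1) 0 then
          acc ++ [(h :: t).getD k 0, (h :: t).getD (k + 1) 0] else acc) acc
      = acc ++ bnd h t := by
  induction t generalizing h acc with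
  | nil => simp [bnd]
  | cons x xs ih =>
    rw [List.length_cons, List.range_succ_eq_map, List.foldl_cons, List.foldl_map]
    have hfn : (fun (a : List Int) (k : Nat) =>
        if (h :: x :: xs).getD (k + 1) 0 + 1 ≠ (h :: x :: xs).getD (k + 1 + 1) 0 then
          a ++ [(h :: x :: xs).getD (k + 1) 0, (h :: x :: xs).getD (k + 1 + 1) 0] else a)
        = (fun (a : List Int) (k : Nat) =>
        if (x :: xs).getD k 0 + 1 ≠ (x :: xs).getD (k + 1) 0 then
          a ++ [(x :: xs).getD k 0, (x :: xs).getD (k + 1) 0] else a) := by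
      funext a k; simp
    rw [hfn, ih]
    simp only [bnd, List.getD_cons_zero, List.getD_cons_succ]
    by_cases hx : h + 1 = x <;> simp [hx]

theorem pairsIdx : ∀ (m : Nat) (l : List Int), l.length = 2 * m →
    (List.range m).map (fun k => [l.getD (2 * k) 0, l.getD (2 * k + 1) 0]) = pairs l := by
  intro m
  induction m with
  | zero =>
    intro l hl
    have : l = [] := List.eq_nil_of_length_eq_zero (by omega)
    subst this; simp [pairs]
  | succ m ih =>
    intro l hl
    match l, hl with
    | a :: b :: r, hl =>
      have hr : r.length = 2 * m := by simp [List.length_cons] at hl; omega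
      rw [List.range_succ_eq_map, List.map_cons, List.map_map]
      have hfn : ((fun k => [(a :: b :: r).getD (2 * k) 0, (a :: b :: r).getD (2 * k + 1) 0])
            ∘ (fun k => k + 1))
          = (fun k => [r.getD (2 * k) 0, r.getD (2 * k + 1) 0]) := by
        funext k
        have e1 : 2 * (k + 1) = 2 * k + 1 + 1 := by omega
        simp [Function.comp, e1]
      rw [hfn, ih r hr]
      simp [pairs]

theorem pairs_bnd : ∀ (t : List Int) (start prev : Int),
    pairs (start :: (bnd prev t ++ [lastD prev t])) = segs start prev t := by
  intro t
  induction t with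
  | nil => intro start prev; simp [bnd, lastD, pairs, segs]
  | cons x xs ih =>
    intro start prev
    simp only [bnd, lastD, segs]
    by_cases hx : prev + 1 = x
    · rw [if_neg (show ¬ prev + 1 ≠ x from by omega),
        if_neg (show ¬ x ≠ prev + 1 from by omega), List.nil_append]
      exact ih start x
    · rw [if_pos hx, if_pos (show x ≠ prev + 1 from by omega)]
      simp only [List.cons_append, List.nil_append, pairs]
      rw [ih x x]

theorem pair_up_cons (h : Int) (t : List Int) :
    pair_up (h :: t) = pairs (h :: (bnd h t ++ [lastD h t])) := by
  have h0 : PySem.List.pyGet? (h :: t) 0 = some h := by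
    simp [PySem.List.pyGet?, PySem.List.pyIdx?]
  have hlen : ((h :: t).length : Int) - 1 = (t.length : Int) := by
    simp
  rw [pair_up, h0, lastD_pyGet, hlen]
  dsimp only
  -- reduce the index loop to bndIdx
  rw [PySem.List.pyRange_zero_natCast, List.foldl_map]
  have hloop : (fun (acc : List Int) (k : Nat) =>
      if PySem.List.pyGetD (h :: t) (↑k) 0 + 1 ≠ PySem.List.pyGetD (h :: t) ((↑k : Int) + 1) 0 then
        acc ++ [PySem.List.pyGetD (h :: t) (↑k) 0, PySem.List.pyGetD (h :: t) ((↑k : Int) + 1) 0]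
      else acc)
      = (fun (acc : List Int) (k : Nat) =>
      if (h :: t).getD k 0 + 1 ≠ (h :: t).getD (k + 1) 0 then
        acc ++ [(h :: t).getD k 0, (h :: t).getD (k + 1) 0] else acc) := by
    funext acc k
    have e : ((k : Int) + 1) = ((k + 1 : Nat) : Int) := by push_cast; ring
    rw [e, PySem.List.pyGetD_natCast, PySem.List.pyGetD_natCast]
  rw [hloop, bndIdx]
  -- the reshaping comprehension
  rcases bnd_even h t with ⟨m, hm⟩
  set ps2 : List Int := [h] ++ bnd h t ++ [lastD h t] with hps2
  have hlen2 : ps2.length = 2 * (m + 1) := by simp [hps2]; omega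
  have hcount : (((ps2.length : Int) - 0 + 2 - 1) / 2).toNat = m + 1 := by
    rw [hlen2]; push_cast; omega
  rw [PySem.List.pyRange_of_pos _ _ (by norm_num : (0:Int) < 2),
    if_pos (by rw [hlen2]; push_cast; omega), hcount, List.map_map]
  have hfn : ((fun i => [PySem.List.pyGetD ps2 i 0, PySem.List.pyGetD ps2 (i + 1) 0])
        ∘ (fun k : Nat => (0 : Int) + 2 * ↑k))
      = (fun k : Nat => [ps2.getD (2 * k) 0, ps2.getD (2 * k + 1) 0]) := by
    funext k
    have e1 : (0 : Int) + 2 * (k : Int) = ((2 * k : Nat) : Int) := by push_cast; ring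
    have e2 : ((2 * k : Nat) : Int) + 1 = ((2 * k + 1 : Nat) : Int) := by push_cast; ring
    simp only [Function.comp, e1, e2, PySem.List.pyGetD_natCast]
  rw [hfn, pairsIdx (m + 1) ps2 hlen2]
  simp [hps2]

theorem pair_up_alt_eq (h : Int) (t : List Int) :
    pair_up_alt (h :: t) = segs h h t := by
  have hl : (fun (st : List (List Int) × Int × Int) (x : Int) =>
      if x ≠ st.2.2 + 1 then (st.1 ++ [[st.2.1, st.2.2]], x, x)
      else (st.1, st.2.1, x)) = bstep := rfl
  simp only [pair_up_alt, hl]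
  exact foldl_alt t [] h h

-- ===== VERDICT (by name: the statement is the Claim_ definition above) =====
theorem pair_up_spec : Claim_equal_pair_up := by
  intro staves _ hpre
  unfold Spec_pair_up
  match staves, hpre with
  | h :: t, _ =>
    rw [pair_up_cons, pair_up_alt_eq, pairs_bnd]
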